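-- pv_equiv track=rewrite | github.com/iteubner/pytesmo | pytesmo/validation_framework/data_manager.py | get_result_names
-- ===== SOURCE A (Python) =====
-- import itertools
--
-- def flatten(seq):
--     l = []
--     for elt in seq:
--         t = type(elt)
--         if t is tuple or t is list:
--             for elt2 in flatten(elt):
--                 l.append(elt2)
--         else:
--             l.append(elt)
--     return l
--
-- def get_result_names(ds_dict, refkey, n=2):
--     """
--     Return result names based on all possible combinations based on a
--     reference dataset.
--
--     Parameters
--     ----------
--     ds_dict: dict
--        Dict of lists containing the dataset names as keys and a list of the
--        columns to read from the dataset as values.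
--     refkey: string
--        dataset name to use as a reference
--     n: int
--         Number of datasets for combine with each other.
--         If n=2 always two datasets will be combined into one result.
--         If n=3 always three datasets will be combined into one results and so on.
--         n has to be <= the number of total datasets.
--
--     Returns
--     -------
--     results_names : list of tuples
--         Containing all combinations of
--         (referenceDataset.column, otherDataset.column)
--     """
--     results_names = []
--
--     ref_columns = []
--     for column in ds_dict[refkey]:
--         ref_columns.append((refkey, column))
--
--     other_columns = []
--     other_names = list(ds_dict)
--     del other_names[other_names.index(refkey)]
--     for other in sorted(other_names):
--         for column in ds_dict[other]:
--             other_columns.append((other, column))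
--
--     for comb in itertools.product(ref_columns,
--                                   itertools.combinations(other_columns, n - 1)):
--         results_names.append(comb)
--
--     # flatten to one level and remove those that do not have n unique
--     # datasets
--     results_names = flatten(results_names)
--
--     # iterate in chunks of n*2 over the list
--     result_combos = []
--     for chunk in [results_names[pos:pos + n * 2] for pos in range(0, len(results_names), n * 2)]:
--         combo = []
--         datasets = chunk[::2]
--         columns = chunk[1::2]
--         # if datasets are compared to themselves then don't include the
--         # combination
--         if len(set(datasets)) != n:
--             continue
--         for dataset, column in zip(datasets, columns):
--             combo.append((dataset, column))
--         result_combos.append(tuple(combo))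
--
--     return result_combos
-- ===== SOURCE B (Python) =====
-- import itertools
--
-- def get_result_names(ds_dict, refkey, n=2):
--     ref_columns = [(refkey, column) for column in ds_dict[refkey]]
--     other_names = sorted(name for name in ds_dict if name != refkey)
--     other_columns = [(other, column)
--                      for other in other_names
--                      for column in ds_dict[other]]
--     result_combos = []
--     for ref in ref_columns:
--         for others in itertools.combinations(other_columns, n - 1):
--             if len({ref[0], *(o[0] for o in others)}) == n:
--                 result_combos.append((ref,) + others)
--     return result_combos
-- ===== Notes on version B (the rewrite author's own statement) =====
-- stated objective: simpler
-- what changed: Replaces A's product/flatten/chunk-and-reslice machinery with a direct double loop over ref columns and itertools.combinations that builds each tuple and checks dataset uniqueness with a set, with no intermediate flattened list.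
import Mathlib
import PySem

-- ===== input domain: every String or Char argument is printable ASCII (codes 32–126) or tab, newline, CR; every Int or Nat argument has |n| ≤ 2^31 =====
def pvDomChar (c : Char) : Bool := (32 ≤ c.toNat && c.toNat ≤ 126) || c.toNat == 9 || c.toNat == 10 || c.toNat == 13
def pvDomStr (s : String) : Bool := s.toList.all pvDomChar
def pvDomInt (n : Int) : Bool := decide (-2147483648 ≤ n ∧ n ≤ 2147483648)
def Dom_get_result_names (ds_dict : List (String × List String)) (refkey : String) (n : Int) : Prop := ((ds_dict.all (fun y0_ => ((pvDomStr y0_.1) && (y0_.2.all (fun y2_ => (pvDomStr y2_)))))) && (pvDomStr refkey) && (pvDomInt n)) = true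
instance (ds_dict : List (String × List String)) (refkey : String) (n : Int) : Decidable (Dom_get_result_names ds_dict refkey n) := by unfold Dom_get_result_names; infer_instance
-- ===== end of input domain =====

-- B replaces A's product/flatten/chunk-and-reslice machinery with one direct double loop
-- that builds each combination tuple and checks dataset uniqueness on the spot (objective: simpler).

-- ===== PORT A =====

-- itertools.combinations(xs, r), in itertools' order (shared library helper, used by both ports)
def pyCombinations {α : Type} : (xs : List α) → Nat → List (List α)
  | _, 0 => [[]]
  | [], _+1 => []
  | x :: t, r+1 => ((pyCombinations t r).map (x :: ·)) ++ pyCombinations t (r+1)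
termination_by structural xs => xs

-- A's recursive `flatten`, monomorphised at the type it is applied to: each element of
-- results_names is a pair of a (dataset, column) tuple and a tuple of such tuples, and
-- flatten descends into tuples until it reaches strings.
def flattenPair (p : String × String) : List String := [p.1, p.2]

def flattenTuple (xs : List (String × String)) : List String :=
  xs.foldl (fun l e => l ++ flattenPair e) []

def flattenComb (c : (String × String) × List (String × String)) : List String :=
  flattenPair c.1 ++ flattenTuple c.2

def get_result_names (ds_dict : List (String × List String)) (refkey : String) (n : Int) : List (List (String × String)) :=
  let d := PySem.Dict.ofList ds_dict
  let ref_columns := ((d.get? refkey).getD []).foldl      -- ds_dict[refkey]: KeyError (outside Pre_) if refkey absent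
      (fun acc column => acc ++ [(refkey, column)]) []
  let other_names := d.keys
  let other_names := match PySem.List.index? other_names refkey with
      | some i => other_names.eraseIdx i
      | none => other_names      -- Python raises ValueError here; outside Pre_
  let other_columns := (PySem.List.sorted other_names (fun x => x) false).foldl
      (fun acc other => ((d.get? other).getD []).foldl
        (fun a column => a ++ [(other, column)]) acc) []
  let results_names := ref_columns.foldl (fun acc rc =>   -- itertools.product(ref_columns, combinations(...))
      (pyCombinations other_columns (n - 1).toNat).foldl  -- combinations raises ValueError for n - 1 < 0 (outside Pre_)
        (fun a comb => a ++ [(rc, comb)]) acc) []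
  let flat := results_names.foldl (fun l c => l ++ flattenComb c) []
  let chunks := (PySem.List.pyRange 0 (flat.length : Int) (n * 2)).foldl
      (fun acc pos => acc ++ [PySem.List.slice flat (some pos) (some (pos + n * 2))]) []
  chunks.foldl (fun result_combos chunk =>
    let datasets := (PySem.List.slice? chunk none none 2).getD []      -- chunk[::2]
    let columns := (PySem.List.slice? chunk (some 1) none 2).getD []   -- chunk[1::2]
    if ((PySem.Set.ofList datasets).length : Int) ≠ n then result_combos
    else
      let combo := (datasets.zip columns).foldl (fun c dc => c ++ [dc]) []
      result_combos ++ [combo]) []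

-- ===== PORT B =====
def get_result_names_alt (ds_dict : List (String × List String)) (refkey : String) (n : Int) : List (List (String × String)) :=
  let d := PySem.Dict.ofList ds_dict
  let ref_columns := ((d.get? refkey).getD []).map (fun column => (refkey, column))
  let other_names := PySem.List.sorted (d.keys.filter (fun name => name != refkey)) (fun x => x) false
  let other_columns := other_names.flatMap (fun other => ((d.get? other).getD []).map (fun column => (other, column)))
  ref_columns.flatMap (fun ref =>
    (pyCombinations other_columns (n - 1).toNat).filterMap (fun others =>
      if ((PySem.Set.ofList (ref.1 :: others.map (·.1))).length : Int) = n
      then some (ref :: others) else none))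

-- ===== PRECONDITION & SPEC =====
-- Pre_ excludes exactly the inputs where Python A raises: a refkey that is not a key of
-- ds_dict (KeyError / ValueError) and n < 1 (itertools.combinations raises ValueError for
-- a negative r).
def Pre_get_result_names (ds_dict : List (String × List String)) (refkey : String) (n : Int) : Prop :=
  refkey ∈ ds_dict.map Prod.fst ∧ 1 ≤ n
instance (ds_dict : List (String × List String)) (refkey : String) (n : Int) : Decidable (Pre_get_result_names ds_dict refkey n) := by unfold Pre_get_result_names; infer_instance

def pvWitness_get_result_names : (List (String × List String)) × String × Int :=
  ([("a", ["c1", "c2"]), ("b", ["d1"])], "a", 2)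

def Spec_get_result_names (ds_dict : List (String × List String)) (refkey : String) (n : Int) (out : List (List (String × String))) : Prop := out = get_result_names_alt ds_dict refkey n
instance (ds_dict : List (String × List String)) (refkey : String) (n : Int) (out : List (List (String × String))) : Decidable (Spec_get_result_names ds_dict refkey n out) := by unfold Spec_get_result_names; infer_instance

-- ===== CLAIM (what is proved, stated in full; the proofs are below) =====
def Claim_equal_get_result_names : Prop := ∀ (ds_dict : List (String × List String)) (refkey : String) (n : Int), Dom_get_result_names ds_dict refkey n → Pre_get_result_names ds_dict refkey n → Spec_get_result_names ds_dict refkey n (get_result_names ds_dict refkey n)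

-- ===== LEMMAS AND PROOFS =====

-- every member of pyCombinations xs r has length r
theorem pyCombinations_length {α : Type} : ∀ (xs : List α) (r : Nat), ∀ ys ∈ pyCombinations xs r, ys.length = r := by
  intro xs
  induction xs with
  | nil => intro r ys h; cases r <;> simp [pyCombinations] at h; simp [h]
  | cons x t ih =>
    intro r ys h
    cases r with
    | zero => simp [pyCombinations] at h; simp [h]
    | succ r =>
      simp [pyCombinations] at h
      rcases h with ⟨zs, hz, rfl⟩ | h
      · simp [ih r zs hz]
      · exact ih (r+1) ys h

theorem flattenTuple_eq (xs : List (String × String)) : flattenTuple xs = xs.flatMap flattenPair := by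
  rw [flattenTuple, PySem.List.foldl_append_eq_flatMap flattenPair xs [], List.nil_append]

-- xs[::2] picks every other element
def everyOther {α : Type} : List α → List α
  | [] => []
  | [a] => [a]
  | a :: _ :: t => a :: everyOther t

theorem filterMap_range_two (α : Type) : ∀ (xs : List α),
    (List.range ((xs.length + 1) / 2)).filterMap (fun k => xs[2 * k]?) = everyOther xs := by
  intro xs
  fun_induction everyOther xs with
  | case1 => simp
  | case2 a => simp
  | case3 a b t ih =>
    have hlen : ((a :: b :: t).length + 1) / 2 = (t.length + 1) / 2 + 1 := by simp; omega
    rw [hlen, List.range_succ_eq_map]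
    simp only [List.filterMap_cons]
    have h0 : (a :: b :: t)[2 * 0]? = some a := by simp
    rw [h0]
    rw [List.filterMap_map]
    have : ((fun k => (a :: b :: t)[2 * k]?) ∘ Nat.succ) = (fun k => t[2 * k]?) := by
      funext k
      have : 2 * Nat.succ k = (2 * k + 1) + 1 := by omega
      simp [this]
    rw [this, ih]
theorem slice?_step_two {α : Type} (xs : List α) :
    PySem.List.slice? xs none none 2 = some (everyOther xs) := by
  rw [← filterMap_range_two]
  simp only [PySem.List.slice?, PySem.List.sliceIndices]
  norm_num
  have hcnt : (if 0 < xs.length then (((xs.length : Int) + 2 - 1) / 2).toNat else 0)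
      = (xs.length + 1) / 2 := by
    split_ifs with h
    · omega
    · omega
  rw [hcnt]
  apply List.filterMap_congr
  intro k _
  congr 1
theorem slice?_one_step_two {α : Type} (xs : List α) :
    PySem.List.slice? xs (some 1) none 2 = some (everyOther (xs.drop 1)) := by
  rw [← filterMap_range_two]
  simp only [PySem.List.slice?, PySem.List.sliceIndices]
  norm_num
  rcases Nat.eq_zero_or_pos xs.length with h0 | hpos
  · have hxs : xs = [] := List.length_eq_zero_iff.mp h0
    subst hxs; simp
  · have hmin : min 1 (xs.length : Int) = 1 := by omega
    rw [hmin]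
    have hcnt : (if 1 < xs.length then (((xs.length : Int) - 1 + 2 - 1) / 2).toNat else 0)
        = ((xs.length - 1) + 1) / 2 := by
      split_ifs with h
      · omega
      · omega
    rw [hcnt]
    apply List.filterMap_congr
    intro k _
    have h1 : ((1 : Int) + 2 * (k : Int)).toNat = 2 * k + 1 := by omega
    rw [h1]

theorem everyOther_flat (ps : List (String × String)) :
    everyOther (ps.flatMap flattenPair) = ps.map (·.1) := by
  induction ps with
  | nil => rfl
  | cons p ps ih => simp [flattenPair, everyOther, ih]

theorem everyOther_cons_flat (x : String) (ps : List (String × String)) :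
    everyOther (x :: ps.flatMap flattenPair) = x :: ps.map (·.2) := by
  induction ps generalizing x with
  | nil => rfl
  | cons p ps ih => simp [flattenPair, everyOther, ih]

theorem chunks_of_blocks {m : Nat} : ∀ (B : List (List String)), (∀ b ∈ B, b.length = m) →
    (List.range B.length).map (fun j => ((B.flatten.drop (m * j)).take m)) = B := by
  intro B
  induction B with
  | nil => simp
  | cons b B ih =>
    intro h
    have hb : b.length = m := h b (by simp)
    rw [List.length_cons, List.range_succ_eq_map, List.map_cons, List.map_map]
    have hhead : List.take m (List.drop (m * 0) (b :: B).flatten) = b := by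
      simp [List.flatten_cons, ← hb, ]
    have htail : ((fun j => List.take m (List.drop (m * j) (b :: B).flatten)) ∘ Nat.succ)
        = (fun j => List.take m (List.drop (m * j) B.flatten)) := by
      funext j
      have h1 : m * Nat.succ j = b.length + m * j := by rw [hb, Nat.succ_eq_add_one]; ring
      simp only [Function.comp_apply, h1, List.flatten_cons]
      rw [← List.drop_drop, List.drop_left]
    rw [hhead, htail, ih (fun x hx => h x (by simp [hx]))]
theorem flatten_length_uniform {m : Nat} (B : List (List String)) (h : ∀ b ∈ B, b.length = m) :
    B.flatten.length = m * B.length := by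
  induction B with
  | nil => simp
  | cons b B ih =>
    simp only [List.flatten_cons, List.length_append, List.length_cons]
    rw [h b (by simp), ih (fun b hb => h b (by simp [hb]))]; ring

theorem pyRange_slice_chunks {m : Nat} (hm : 0 < m) (B : List (List String)) (h : ∀ b ∈ B, b.length = m) :
    (PySem.List.pyRange 0 (B.flatten.length : Int) (m : Int)).map
      (fun pos => PySem.List.slice B.flatten (some pos) (some (pos + (m : Int)))) = B := by
  have hms : (0 : Int) < (m : Int) := by exact_mod_cast hm
  rw [PySem.List.pyRange_of_pos _ _ hms]
  have hlen := flatten_length_uniform B h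
  have hcnt : (if (0:Int) < (B.flatten.length : Int) then (((B.flatten.length : Int) - 0 + (m:Int) - 1) / (m:Int)).toNat else 0) = B.length := by
    rw [hlen]
    split_ifs with hpos
    · have hq : 0 < B.length := by
        by_contra hq
        have : B.length = 0 := by omega
        rw [this] at hpos; simp at hpos
      have : ((m * B.length : Nat) : Int) - 0 + (m:Int) - 1 = ((m:Int) - 1) + B.length * m := by push_cast; ring
      rw [this, Int.add_mul_ediv_right _ _ (by omega : (m:Int) ≠ 0),
        Int.ediv_eq_zero_of_lt (by omega) (by omega)]
      omega
    · have : B.length = 0 := by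
        by_contra hq
        have h1 : 0 < m * B.length := Nat.mul_pos hm (by omega)
        push_cast at hpos
        omega
      omega
  rw [hcnt]
  refine Eq.trans ?_ (chunks_of_blocks B h)
  apply List.ext_getElem
  · simp
  · intro i h1 h2
    simp only [List.getElem_map, List.getElem_range]
    have h0 : (0 : Int) + (m:Int) * (i:Int) = ((m * i : Nat) : Int) := by push_cast; ring
    have h2' : ((m * i : Nat) : Int) + (m : Int) = ((m * i + m : Nat) : Int) := by push_cast; ring
    rw [h0, h2', PySem.List.slice_natCast]
    congr 1
    omega

theorem index?_mem_eq_some_idxOf {α : Type} [BEq α] [LawfulBEq α] (l : List α) (a : α) (h : a ∈ l) :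
    PySem.List.index? l a = some (l.idxOf a) := by
  rw [PySem.List.index?_eq_idxOf?]
  obtain ⟨k, hk⟩ := Option.isSome_iff_exists.mp ((List.isSome_idxOf?).mpr h)
  rw [hk, List.idxOf_eq_getD_idxOf?, hk]
  rfl

theorem erase_match_filter {α : Type} [BEq α] [LawfulBEq α] (l : List α) (a : α) (h : a ∈ l) (hnd : l.Nodup) :
    (match PySem.List.index? l a with
     | some i => l.eraseIdx i
     | none => l) = l.filter (fun x => x != a) := by
  rw [index?_mem_eq_some_idxOf l a h]
  simp only []
  rw [← List.erase_eq_eraseIdx_of_idxOf rfl, List.Nodup.erase_eq_filter hnd]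

theorem filterMap_ite {α β : Type} (p : α → Prop) [DecidablePred p] (f : α → β) (l : List α) :
    l.filterMap (fun x => if p x then some (f x) else none)
      = (l.filter (fun x => decide (p x))).map f := by
  induction l with
  | nil => rfl
  | cons x l ih => by_cases h : p x <;> simp [h, ih]

theorem foldl_skip {α β : Type} (P : α → Prop) [DecidablePred P] (g : α → β) (l : List α) (acc : List β) :
    l.foldl (fun acc x => if P x then acc else acc ++ [g x]) acc
      = acc ++ (l.filter (fun x => decide (¬ P x))).map g := by
  induction l generalizing acc with
  | nil => simp
  | cons x l ih => by_cases h : P x <;> simp [h, ih]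

theorem zip_fst_snd (ps : List (String × String)) :
    (ps.map (·.1)).zip (ps.map (·.2)) = ps := by
  induction ps with
  | nil => rfl
  | cons p ps ih => simp [ih]

-- ===== VERDICT (by name: the statement is the Claim_ definition above) =====
theorem get_result_names_spec : Claim_equal_get_result_names := by
  intro ds refkey n _ hpre
  obtain ⟨href, hn⟩ := hpre
  unfold Spec_get_result_names get_result_names get_result_names_alt
  simp only [PySem.List.foldl_append_singleton_eq_map,
    PySem.List.foldl_append_eq_flatMap, List.nil_append]
  have hkeys : (PySem.Dict.ofList ds).keys = PySem.Set.ofList (ds.map Prod.fst) := by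
    have h1 := PySem.Dict.keys_foldl_insert_key (ν := List String) ds Prod.fst (fun _ p => p.2) PySem.Dict.empty
    simpa [PySem.Dict.ofList, PySem.Dict.update, PySem.Set.ofList] using h1
  have hmem : refkey ∈ (PySem.Dict.ofList ds).keys := by
    rw [hkeys]; exact (PySem.Set.mem_ofList _ _).mpr href
  have hnd : (PySem.Dict.ofList ds).keys.Nodup := PySem.Dict.nodup_keys_ofList ds
  rw [erase_match_filter _ _ hmem hnd]
  have hk : ((n - 1).toNat : Int) = n - 1 := Int.toNat_of_nonneg (by omega)
  set k := (n - 1).toNat with hkdef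
  have hn2 : n * 2 = ((2 * k + 2 : Nat) : Int) := by push_cast; omega
  rw [hn2]
  set cols := ((PySem.Dict.ofList ds).get? refkey).getD [] with hcols
  set oc := List.flatMap (fun x => List.map (Prod.mk x) (((PySem.Dict.ofList ds).get? x).getD []))
      (PySem.List.sorted (List.filter (fun x => x != refkey) (PySem.Dict.ofList ds).keys) (fun x => x)) with hoc
  set combs := pyCombinations oc k with hcombs
  set L := List.flatMap (fun x => List.map (Prod.mk x) combs) (List.map (Prod.mk refkey) cols) with hL
  have hflat : List.flatMap flattenComb L = (L.map flattenComb).flatten := by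
    rw [List.flatMap_def]
  rw [hflat]
  have hunif : ∀ b ∈ L.map flattenComb, b.length = 2 * k + 2 := by
    intro b hb
    simp only [hL, List.mem_map, List.mem_flatMap] at hb
    obtain ⟨c, ⟨x, _, ⟨others, ho, rfl⟩⟩, rfl⟩ := hb
    have hlen := pyCombinations_length oc k others ho
    simp [flattenComb, flattenPair, flattenTuple_eq, hlen]
    omega
  rw [pyRange_slice_chunks (by omega) _ hunif]
  rw [foldl_skip, List.nil_append, List.filter_map, List.map_map]
  rw [hL, List.filter_flatMap, List.map_flatMap]
  apply List.flatMap_congr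
  intro x _
  rw [List.filter_map, List.map_map, filterMap_ite]
  have hfil : List.filter (((fun c => decide ¬↑(List.length (PySem.Set.ofList ((PySem.List.slice? c none none 2).getD []))) ≠ n) ∘ flattenComb) ∘ Prod.mk x) combs
      = List.filter (fun others => decide (↑(List.length (PySem.Set.ofList (x.1 :: List.map (fun y => y.1) others))) = n)) combs := by
    apply List.filter_congr
    intro others ho
    have hlen := pyCombinations_length oc k others ho
    simp only [Function.comp_apply]
    have hFC : flattenComb (x, others) = x.1 :: x.2 :: others.flatMap flattenPair := by
      simp [flattenComb, flattenPair, flattenTuple_eq]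
    rw [hFC, slice?_step_two]
    simp only [Option.getD_some]
    rw [show everyOther (x.1 :: x.2 :: others.flatMap flattenPair) = x.1 :: everyOther (others.flatMap flattenPair) from rfl,
      everyOther_flat]
    simp
  rw [hfil]
  apply List.map_congr_left
  intro others ho
  have hmemc : others ∈ combs := List.mem_of_mem_filter ho
  have hlen := pyCombinations_length oc k others hmemc
  simp only [Function.comp_apply]
  have hFC : flattenComb (x, others) = x.1 :: x.2 :: others.flatMap flattenPair := by
    simp [flattenComb, flattenPair, flattenTuple_eq]
  rw [hFC, slice?_step_two, slice?_one_step_two]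
  simp only [Option.getD_some, List.drop_succ_cons, List.drop_zero]
  rw [show everyOther (x.1 :: x.2 :: others.flatMap flattenPair) = x.1 :: everyOther (others.flatMap flattenPair) from rfl,
    everyOther_flat, everyOther_cons_flat]
  simp [zip_fst_snd]
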